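-- pv_equiv track=rewrite | github.com/Travelinglight/GhotiNLP | chunker/answer/chunk.py | global_feature_vector
-- ===== SOURCE A (Python) =====
-- from collections import defaultdict
--
-- def global_feature_vector(feat_list, tag_list):
--     global_vector = defaultdict(int)
--
--     index = -1
--     prev_tag = 'B_-1'
--     for i in range(len(feat_list)):
--         feat_value = feat_list[i]
--         # check if we reached the feats for the next word
--         if feat_value[:4] == 'U00:':
--             index += 1
--             if (index > 0):
--                 prev_tag = tag_list[index - 1]
--
--         if feat_value[0] == 'B':
--             feat_value = 'B:' + prev_tag
--
--         global_vector[(feat_value, tag_list[index])] += 1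
--
--     return global_vector
-- ===== SOURCE B (Python) =====
-- # B: split feat_list into per-word segments first, then compute prev_tag/tag once
-- # per segment by closed form and count the generated (feature, tag) pairs in a
-- # final pass -- a different decomposition of A's single stateful scan.
-- from collections import defaultdict
--
--
-- def _split(feat_list):
--     # (features before the first 'U00:' feature, list of segments each starting
--     # with its 'U00:' feature): a right fold over feat_list, consing onto
--     # (pre, segs); the growing lists are kept reversed so each step is O(1).
--     pre_r, segs_r = [], []
--     for feat in reversed(feat_list):
--         if feat[:4] == 'U00:':
--             segs_r.append([feat] + pre_r[::-1])
--             pre_r = []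
--         else:
--             pre_r.append(feat)
--     return pre_r[::-1], segs_r[::-1]
--
--
-- def _pairs(tag_list, index, segments):
--     result = []
--     for seg in segments:
--         if seg:
--             prev_tag = 'B_-1' if index <= 0 else tag_list[index - 1]
--             tag = tag_list[index]
--             for feat in seg:
--                 key = 'B:' + prev_tag if feat[0] == 'B' else feat
--                 result.append((key, tag))
--         index += 1
--     return result
--
--
-- def global_feature_vector(feat_list, tag_list):
--     pre, segs = _split(feat_list)
--     out = defaultdict(int)
--     for key in _pairs(tag_list, -1, [pre] + segs):
--         out[key] += 1
--     return out
-- ===== Notes on version B (the rewrite author's own statement) =====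
-- stated objective: alternative
-- what changed: B first partitions feat_list into per-word segments at each 'U00:' feature, then computes prev_tag and tag once per segment by closed form ('B_-1' if index<=0 else tag_list[index-1]), emits the flat (feature, tag) pair list, and counts it in a separate final pass, instead of A's single scan threading index/prev_tag state through a defaultdict.
import Mathlib
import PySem

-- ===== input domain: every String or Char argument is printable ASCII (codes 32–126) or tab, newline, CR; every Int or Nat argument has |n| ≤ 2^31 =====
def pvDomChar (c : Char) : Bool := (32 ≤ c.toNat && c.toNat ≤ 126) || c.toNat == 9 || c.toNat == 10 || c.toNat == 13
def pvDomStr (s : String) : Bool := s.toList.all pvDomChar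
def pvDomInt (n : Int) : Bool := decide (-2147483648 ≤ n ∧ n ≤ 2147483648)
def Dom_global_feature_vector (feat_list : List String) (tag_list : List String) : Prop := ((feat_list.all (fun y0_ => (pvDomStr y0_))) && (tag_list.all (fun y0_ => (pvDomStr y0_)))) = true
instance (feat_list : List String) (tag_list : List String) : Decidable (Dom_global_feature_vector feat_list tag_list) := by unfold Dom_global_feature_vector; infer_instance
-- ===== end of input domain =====

-- B re-decomposes A's single stateful scan: split into per-word segments, closed-form
-- prev_tag/tag per segment, then count the generated pair list (objective: alternative).

-- feat[:4] == 'U00:'  (the word-boundary test both Pythons contain verbatim)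
def gfvIsU (f : String) : Bool := PySem.Str.slice f none (some 4) == "U00:"

-- defaultdict(int) increment  d[k] += 1  (both Pythons contain this statement)
def gfvIncr (d : PySem.Dict (String × String) Int) (k : String × String) :
    PySem.Dict (String × String) Int :=
  d.insert k (d.getD k 0 + 1)

-- ===== PORT A =====
-- A's loop over feat_list threading (index, prev_tag, global_vector); none = the raise.
def gfvA_loop (tags : List String) : List String → Int → String →
    PySem.Dict (String × String) Int → Option (PySem.Dict (String × String) Int)
  | [], _, _, d => some d
  | f :: rest, i, prev, d =>
    let i' := if gfvIsU f then i + 1 else i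
    match (if gfvIsU f ∧ 0 < i' then PySem.List.pyGet? tags (i' - 1) else some prev) with
    | none => none
    | some prev' =>
      match PySem.Str.pyGet? f 0 with
      | none => none
      | some c =>
        let fv := if c = 'B' then "B:" ++ prev' else f
        match PySem.List.pyGet? tags i' with
        | none => none
        | some tag => gfvA_loop tags rest i' prev' (gfvIncr d (fv, tag))

def global_feature_vector (feat_list : List String) (tag_list : List String) :
    List (String × String × Int) :=
  match gfvA_loop tag_list feat_list (-1) "B_-1" PySem.Dict.empty with
  | none => []
  | some d => d.items.map (fun kv => (kv.1.1, kv.1.2, kv.2))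

-- ===== PORT B =====
-- _split: (features before the first 'U00:', segments each starting with a 'U00:'), right fold.
def gfvB_split : List String → List String × List (List String)
  | [] => ([], [])
  | f :: rest =>
    let (p, ss) := gfvB_split rest
    if gfvIsU f then ([], (f :: p) :: ss) else (f :: p, ss)

-- key = 'B:' + prev_tag if feat[0] == 'B' else feat
def gfvB_featPair (prev tag : String) (f : String) : Option (String × String) :=
  Option.map (fun c => ((if c = 'B' then "B:" ++ prev else f), tag)) (PySem.Str.pyGet? f 0)

def gfvB_pairsOf (prev tag : String) : List String → Option (List (String × String))
  | [] => some []
  | f :: rest =>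
    Option.bind (gfvB_featPair prev tag f) fun p =>
      Option.map (fun ps => p :: ps) (gfvB_pairsOf prev tag rest)

-- one segment at word index i: prev_tag/tag by closed form, skip an empty segment
def gfvB_segPairs (tags : List String) (i : Int) : List String → Option (List (String × String))
  | [] => some []
  | f :: rest =>
    Option.bind (if i ≤ 0 then some "B_-1" else PySem.List.pyGet? tags (i - 1)) fun prev =>
      Option.bind (PySem.List.pyGet? tags i) fun tag =>
        gfvB_pairsOf prev tag (f :: rest)

-- _pairs: the segments in order, word index counting up from -1
def gfvB_loop (tags : List String) : Int → List (List String) → Option (List (String × String))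
  | _, [] => some []
  | i, seg :: rest =>
    Option.bind (gfvB_segPairs tags i seg) fun ps =>
      Option.map (fun qs => ps ++ qs) (gfvB_loop tags (i + 1) rest)

def global_feature_vector_alt (feat_list : List String) (tag_list : List String) :
    List (String × String × Int) :=
  match gfvB_loop tag_list (-1) ((gfvB_split feat_list).1 :: (gfvB_split feat_list).2) with
  | none => []
  | some ps => (ps.foldl gfvIncr PySem.Dict.empty).items.map (fun kv => (kv.1.1, kv.1.2, kv.2))

-- ===== PRECONDITION & SPEC =====
-- Pre_ excludes exactly the inputs where A raises IndexError: an empty feature string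
-- (feat_value[0]), more 'U00:' features than tags (tag_list[index]), or a feature before
-- the first 'U00:' with tag_list empty (tag_list[-1]).
def Pre_global_feature_vector (feat_list : List String) (tag_list : List String) : Prop :=
  (∀ f ∈ feat_list, f ≠ "") ∧
  (feat_list.filter (fun f => gfvIsU f)).length ≤ tag_list.length ∧
  ((feat_list ≠ [] ∧ ¬ gfvIsU (feat_list.headD "") = true) → tag_list ≠ [])
instance (feat_list : List String) (tag_list : List String) :
    Decidable (Pre_global_feature_vector feat_list tag_list) := by
  unfold Pre_global_feature_vector; infer_instance

def pvWitness_global_feature_vector : List String × List String :=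
  (["U00:w1", "Babc"], ["T1"])

def Spec_global_feature_vector (feat_list : List String) (tag_list : List String)
    (out : List (String × String × Int)) : Prop :=
  out = global_feature_vector_alt feat_list tag_list
instance (feat_list : List String) (tag_list : List String) (out : List (String × String × Int)) :
    Decidable (Spec_global_feature_vector feat_list tag_list out) := by
  unfold Spec_global_feature_vector; infer_instance

-- ===== CLAIM (what is proved, stated in full; the proofs are below) =====
def Claim_equal_global_feature_vector : Prop := ∀ (feat_list : List String) (tag_list : List String), Dom_global_feature_vector feat_list tag_list → Pre_global_feature_vector feat_list tag_list → Spec_global_feature_vector feat_list tag_list (global_feature_vector feat_list tag_list)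

-- ===== LEMMAS AND PROOFS =====

-- the common reference form: per-feature pairs with the word index threaded through
def gfvPairs (tags : List String) : List String → Int → Option (List (String × String))
  | [], _ => some []
  | f :: rest, i =>
    let i' := if gfvIsU f then i + 1 else i
    Option.bind (if i' ≤ 0 then some "B_-1" else PySem.List.pyGet? tags (i' - 1)) fun prev =>
      Option.bind (PySem.Str.pyGet? f 0) fun c =>
        Option.bind (PySem.List.pyGet? tags i') fun tag =>
          Option.map (fun ps => ((if c = 'B' then "B:" ++ prev else f), tag) :: ps)
            (gfvPairs tags rest i')

-- A's loop is "generate the pairs, then count them", given the loop invariant on (i, prev)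
theorem gfvA_loop_eq_pairs (tags : List String) (feats : List String) :
    ∀ (i : Int) (prev : String) (d : PySem.Dict (String × String) Int),
      (i ≤ 0 → prev = "B_-1") → (0 < i → PySem.List.pyGet? tags (i - 1) = some prev) →
      gfvA_loop tags feats i prev d =
        Option.map (fun ps => ps.foldl gfvIncr d) (gfvPairs tags feats i) := by
  induction feats with
  | nil => intro i prev d _ _; simp [gfvA_loop, gfvPairs]
  | cons f rest ih =>
    intro i prev d h0 h1
    by_cases hU : gfvIsU f = true
    · by_cases hi : 0 < i + 1
      · -- new word with nonnegative previous index: prev_tag is looked up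
        have he : (i : Int) + 1 - 1 = i := by omega
        cases hprev : PySem.List.pyGet? tags i with
        | none => simp [gfvA_loop, gfvPairs, hU, hi, he, hprev, show ¬ (i + 1 ≤ 0) by omega]
        | some t =>
          cases hc : PySem.List.pyGet? f.toList 0 with
          | none => simp [gfvA_loop, gfvPairs, hU, hi, he, hprev, hc,
              show ¬ (i + 1 ≤ 0) by omega]
          | some c =>
            cases htag : PySem.List.pyGet? tags (i + 1) with
            | none => simp [gfvA_loop, gfvPairs, hU, hi, he, hprev, hc, htag,
                show ¬ (i + 1 ≤ 0) by omega]
            | some tag =>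
              have hrec := ih (i + 1) t (gfvIncr d ((if c = 'B' then "B:" ++ t else f), tag))
                (by omega) (by intro _; rw [he]; exact hprev)
              simp [gfvA_loop, gfvPairs, hU, hi, he, hprev, hc, htag,
                show ¬ (i + 1 ≤ 0) by omega, hrec]
              cases gfvPairs tags rest (i + 1) <;> simp [List.foldl]
      · -- new word but index still ≤ 0: prev_tag stays 'B_-1'
        have hprev : prev = "B_-1" := h0 (by omega)
        subst hprev
        cases hc : PySem.List.pyGet? f.toList 0 with
        | none => simp [gfvA_loop, gfvPairs, hU, hi, hc, show i + 1 ≤ 0 by omega]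
        | some c =>
          cases htag : PySem.List.pyGet? tags (i + 1) with
          | none => simp [gfvA_loop, gfvPairs, hU, hi, hc, htag, show i + 1 ≤ 0 by omega]
          | some tag =>
            have hrec := ih (i + 1) "B_-1"
              (gfvIncr d ((if c = 'B' then "B:B_-1" else f), tag))
              (fun _ => rfl) (by omega)
            simp [gfvA_loop, gfvPairs, hU, hi, hc, htag, show i + 1 ≤ 0 by omega, hrec]
            cases gfvPairs tags rest (i + 1) <;> simp [List.foldl]
    · -- same word: index and prev_tag unchanged; the invariant supplies the closed form
      by_cases hi : i ≤ 0
      · have hprev : prev = "B_-1" := h0 hi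
        subst hprev
        cases hc : PySem.List.pyGet? f.toList 0 with
        | none => simp [gfvA_loop, gfvPairs, hU, hi, hc]
        | some c =>
          cases htag : PySem.List.pyGet? tags i with
          | none => simp [gfvA_loop, gfvPairs, hU, hi, hc, htag]
          | some tag =>
            have hrec := ih i "B_-1" (gfvIncr d ((if c = 'B' then "B:B_-1" else f), tag)) h0 h1
            simp [gfvA_loop, gfvPairs, hU, hi, hc, htag, hrec]
            cases gfvPairs tags rest i <;> simp [List.foldl]
      · have hprev : PySem.List.pyGet? tags (i - 1) = some prev := h1 (by omega)
        cases hc : PySem.List.pyGet? f.toList 0 with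
        | none => simp [gfvA_loop, gfvPairs, hU, hi, hc, hprev]
        | some c =>
          cases htag : PySem.List.pyGet? tags i with
          | none => simp [gfvA_loop, gfvPairs, hU, hi, hc, htag, hprev]
          | some tag =>
            have hrec := ih i prev (gfvIncr d ((if c = 'B' then "B:" ++ prev else f), tag)) h0 h1
            simp [gfvA_loop, gfvPairs, hU, hi, hc, htag, hprev, hrec]
            cases gfvPairs tags rest i <;> simp [List.foldl]

-- peeling the head feature off the current segment inside B's segment loop
theorem gfvB_loop_cons_cons (tags : List String) (i : Int) (f : String)
    (p : List String) (ss : List (List String)) :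
    gfvB_loop tags i ((f :: p) :: ss) =
      Option.bind (if i ≤ 0 then some "B_-1" else PySem.List.pyGet? tags (i - 1)) fun prev =>
        Option.bind (PySem.Str.pyGet? f 0) fun c =>
          Option.bind (PySem.List.pyGet? tags i) fun tag =>
            Option.map (fun ps => ((if c = 'B' then "B:" ++ prev else f), tag) :: ps)
              (gfvB_loop tags i (p :: ss)) := by
  cases hprev : (if i ≤ 0 then some "B_-1" else PySem.List.pyGet? tags (i - 1)) with
  | none =>
    simp [gfvB_loop, gfvB_segPairs, hprev]
  | some prev =>
    cases htag : PySem.List.pyGet? tags i with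
    | none =>
      cases p <;> simp [gfvB_loop, gfvB_segPairs, hprev, htag]
    | some tag =>
      cases hc : PySem.List.pyGet? f.toList 0 with
      | none =>
        cases p <;>
          simp [gfvB_loop, gfvB_segPairs, gfvB_pairsOf, gfvB_featPair, hprev, htag, hc]
      | some c =>
        cases p with
        | nil =>
          simp [gfvB_loop, gfvB_segPairs, gfvB_pairsOf, gfvB_featPair, hprev, htag, hc]
        | cons q p' =>
          simp [gfvB_loop, gfvB_segPairs, gfvB_pairsOf, gfvB_featPair, hprev, htag, hc]
          all_goals
            cases PySem.List.pyGet? q.toList 0 <;>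
              cases gfvB_pairsOf prev tag p' <;>
                cases gfvB_loop tags (i + 1) ss <;> simp

-- an empty leading segment is skipped, the word index still advances
theorem gfvB_loop_nil_seg (tags : List String) (i : Int) (L : List (List String)) :
    gfvB_loop tags i ([] :: L) = gfvB_loop tags (i + 1) L := by
  have h : gfvB_loop tags i ([] :: L) =
      Option.map (fun qs => ([] : List (String × String)) ++ qs) (gfvB_loop tags (i + 1) L) := by
    simp [gfvB_loop, gfvB_segPairs, Option.map_eq_bind]
  rw [h]; cases gfvB_loop tags (i + 1) L <;> simp

-- B's split-then-segment-loop generates exactly the reference pairs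
theorem gfvB_loop_split_eq_pairs (tags : List String) (feats : List String) :
    ∀ i : Int, gfvB_loop tags i ((gfvB_split feats).1 :: (gfvB_split feats).2) =
      gfvPairs tags feats i := by
  induction feats with
  | nil => intro i; simp [gfvB_split, gfvB_loop, gfvB_segPairs, gfvPairs]
  | cons f rest ih =>
    intro i
    by_cases hU : gfvIsU f = true
    · have : gfvB_split (f :: rest) =
          ([], (f :: (gfvB_split rest).1) :: (gfvB_split rest).2) := by
        simp [gfvB_split, hU]
      rw [this]
      rw [gfvB_loop_nil_seg, gfvB_loop_cons_cons, ih (i + 1)]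
      simp [gfvPairs, hU]
    · have : gfvB_split (f :: rest) =
          ((f :: (gfvB_split rest).1), (gfvB_split rest).2) := by
        simp [gfvB_split, hU]
      rw [this, gfvB_loop_cons_cons, ih i]
      simp [gfvPairs, hU]

-- ===== VERDICT (by name: the statement is the Claim_ definition above) =====
theorem global_feature_vector_spec : Claim_equal_global_feature_vector := by
  intro feat_list tag_list _ _
  unfold Spec_global_feature_vector global_feature_vector global_feature_vector_alt
  rw [gfvA_loop_eq_pairs tag_list feat_list (-1) "B_-1" PySem.Dict.empty
    (fun _ => rfl) (by omega)]
  rw [gfvB_loop_split_eq_pairs tag_list feat_list (-1)]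
  cases gfvPairs tag_list feat_list (-1) <;> simp
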